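-- pv_equiv track=rewrite | github.com/alexstuk/chess-engine | selecter.py | uneven_material
-- ===== SOURCE A (Python) =====
-- def uneven_material(fen):
--     # Function counts the material from fen notation
--     pieces_value_white = {'q': 9,
--                         'r': 5,
--                         'b': 3,
--                         'n': 3,
--                         'p': 1
--                         }
--     pieces_value_black = {'Q': 9,
--                         'R': 5,
--                         'B': 3,
--                         'N': 3,
--                         'P': 1
--                         }
--     white_material = 0
--     black_material = 0
--     first_part = True
--
--     for letter in fen:
--         if first_part:
--             if letter in pieces_value_white:
--                 white_material += pieces_value_white[letter]
--             if letter in pieces_value_black: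
--                 black_material += pieces_value_black[letter]
--             if letter == ' ':
--                 first_part = False
--
--     if white_material > black_material:
--         return 'white', white_material - black_material
--     if white_material < black_material:
--         return 'black', black_material - white_material
--     if white_material == black_material:
--         return 'none', 0
-- ===== SOURCE B (Python) =====
-- import collections
--
-- def uneven_material(fen):
--     # Two-phase: tally the board part once with a Counter, then reduce over the value tables.
--     board = fen.split(' ', 1)[0]
--     counts = collections.Counter(board)
--     white_material = sum(counts[p] * v for p, v in {'q': 9, 'r': 5, 'b': 3, 'n': 3, 'p': 1}.items())
--     black_material = sum(counts[p] * v for p, v in {'Q': 9, 'R': 5, 'B': 3, 'N': 3, 'P': 1}.items())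
--     if white_material > black_material:
--         return 'white', white_material - black_material
--     if white_material < black_material:
--         return 'black', black_material - white_material
--     return 'none', 0
-- ===== Notes on version B (the rewrite author's own statement) =====
-- stated objective: idiomatic
-- what changed: Replaced the single stateful character loop with a first_part flag by a two-phase tally-then-reduce: split off the board part, build a Counter frequency table once, then sum counts[p]*v over the two value tables.
import Mathlib
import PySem

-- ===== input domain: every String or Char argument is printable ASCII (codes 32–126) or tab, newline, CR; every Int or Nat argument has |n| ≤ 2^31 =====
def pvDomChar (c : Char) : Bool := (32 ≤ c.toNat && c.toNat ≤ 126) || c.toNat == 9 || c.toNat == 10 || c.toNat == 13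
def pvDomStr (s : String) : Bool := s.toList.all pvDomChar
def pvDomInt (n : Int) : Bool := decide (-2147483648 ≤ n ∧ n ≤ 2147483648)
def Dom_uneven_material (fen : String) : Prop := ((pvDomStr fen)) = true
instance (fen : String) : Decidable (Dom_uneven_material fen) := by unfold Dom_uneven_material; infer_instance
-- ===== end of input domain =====

-- B replaces A's single stateful loop (first_part flag) by a tally-then-reduce over the board
-- prefix: same return value everywhere; objective: idiomatic, no speed claim.

-- ===== PORT A =====
-- A's two value dicts
def pvwA : PySem.Dict Char Int := PySem.Dict.ofList [('q',9),('r',5),('b',3),('n',3),('p',1)]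
def pvbA : PySem.Dict Char Int := PySem.Dict.ofList [('Q',9),('R',5),('B',3),('N',3),('P',1)]

-- one step of A's for-loop on the state (white_material, black_material, first_part)
def umStep (st : Int × Int × Bool) (letter : Char) : Int × Int × Bool :=
  if st.2.2 then
    let w := if pvwA.contains letter then st.1 + pvwA.getD letter 0 else st.1
    let b := if pvbA.contains letter then st.2.1 + pvbA.getD letter 0 else st.2.1
    let fp := if letter = ' ' then false else st.2.2
    (w, b, fp)
  else st

def uneven_material (fen : String) : String × Int :=
  let st := fen.toList.foldl umStep (0, 0, true)
  if st.1 > st.2.1 then ("white", st.1 - st.2.1)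
  else if st.1 < st.2.1 then ("black", st.2.1 - st.1)
  else ("none", 0)

-- ===== PORT B =====
-- fen.split(' ', 1)[0] is the prefix before the first space; Counter(board) is PySem.Dict.counter
def uneven_material_alt (fen : String) : String × Int :=
  let board := fen.toList.takeWhile (· ≠ ' ')
  let counts := PySem.Dict.counter board
  let white_material : Int :=
    ([('q',9),('r',5),('b',3),('n',3),('p',1)] : List (Char × Int)).foldl
      (fun a pv => a + counts.getD pv.1 0 * pv.2) 0
  let black_material : Int :=
    ([('Q',9),('R',5),('B',3),('N',3),('P',1)] : List (Char × Int)).foldl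
      (fun a pv => a + counts.getD pv.1 0 * pv.2) 0
  if white_material > black_material then ("white", white_material - black_material)
  else if white_material < black_material then ("black", black_material - white_material)
  else ("none", 0)

-- ===== PRECONDITION & SPEC =====
def Spec_uneven_material (fen : String) (out : String × Int) : Prop := out = uneven_material_alt fen
instance (fen : String) (out : String × Int) : Decidable (Spec_uneven_material fen out) := by unfold Spec_uneven_material; infer_instance

-- ===== CLAIM (what is proved, stated in full; the proofs are below) =====
def Claim_equal_uneven_material : Prop := ∀ (fen : String), Dom_uneven_material fen → Spec_uneven_material fen (uneven_material fen)

-- ===== LEMMAS AND PROOFS =====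

-- per-character white/black piece values
def wVal (c : Char) : Int :=
  if c = 'q' then 9 else if c = 'r' then 5 else if c = 'b' then 3
  else if c = 'n' then 3 else if c = 'p' then 1 else 0
def bVal (c : Char) : Int :=
  if c = 'Q' then 9 else if c = 'R' then 5 else if c = 'B' then 3
  else if c = 'N' then 3 else if c = 'P' then 1 else 0

-- weighted-count sums over a char list
def wSum (l : List Char) : Int :=
  (l.count 'q' : Int) * 9 + (l.count 'r' : Int) * 5 + (l.count 'b' : Int) * 3
  + (l.count 'n' : Int) * 3 + (l.count 'p' : Int) * 1
def bSum (l : List Char) : Int :=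
  (l.count 'Q' : Int) * 9 + (l.count 'R' : Int) * 5 + (l.count 'B' : Int) * 3
  + (l.count 'N' : Int) * 3 + (l.count 'P' : Int) * 1

theorem wSum_cons (c : Char) (t : List Char) : wSum (c :: t) = wSum t + wVal c := by
  simp only [wSum, wVal, List.count_cons, beq_iff_eq]
  by_cases hq : c = 'q' <;> by_cases hr : c = 'r' <;> by_cases hb : c = 'b' <;>
    by_cases hn : c = 'n' <;> by_cases hp : c = 'p' <;> simp_all <;> ring

theorem bSum_cons (c : Char) (t : List Char) : bSum (c :: t) = bSum t + bVal c := by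
  simp only [bSum, bVal, List.count_cons, beq_iff_eq]
  by_cases hq : c = 'Q' <;> by_cases hr : c = 'R' <;> by_cases hb : c = 'B' <;>
    by_cases hn : c = 'N' <;> by_cases hp : c = 'P' <;> simp_all <;> ring

-- A's guarded dict add is the same as adding the piece value (0 for non-pieces)
theorem wAdd (w : Int) (c : Char) :
    (if pvwA.contains c then w + pvwA.getD c 0 else w) = w + wVal c := by
  have h : pvwA = PySem.Dict.mk [('q',9),('r',5),('b',3),('n',3),('p',1)] := by decide
  by_cases hq : c = 'q' <;> by_cases hr : c = 'r' <;> by_cases hb : c = 'b' <;>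
    by_cases hn : c = 'n' <;> by_cases hp : c = 'p' <;> subst_vars <;>
    first
    | simp [h, wVal, hq, hr, hb, hn, hp, Ne.symm hq, Ne.symm hr, Ne.symm hb, Ne.symm hn, Ne.symm hp,
        PySem.Dict.contains]
    | simp [h, wVal, PySem.Dict.contains, PySem.Dict.getD, PySem.Dict.get?]

theorem bAdd (b : Int) (c : Char) :
    (if pvbA.contains c then b + pvbA.getD c 0 else b) = b + bVal c := by
  have h : pvbA = PySem.Dict.mk [('Q',9),('R',5),('B',3),('N',3),('P',1)] := by decide
  by_cases hq : c = 'Q' <;> by_cases hr : c = 'R' <;> by_cases hb : c = 'B' <;>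
    by_cases hn : c = 'N' <;> by_cases hp : c = 'P' <;> subst_vars <;>
    first
    | simp [h, bVal, hq, hr, hb, hn, hp, Ne.symm hq, Ne.symm hr, Ne.symm hb, Ne.symm hn, Ne.symm hp,
        PySem.Dict.contains]
    | simp [h, bVal, PySem.Dict.contains, PySem.Dict.getD, PySem.Dict.get?]

theorem umStep_true (w b : Int) (c : Char) :
    umStep (w, b, true) c = (w + wVal c, b + bVal c, if c = ' ' then false else true) := by
  simp only [umStep, if_true]
  rw [wAdd, bAdd]

-- A's loop is inert once first_part is false
theorem umFold_false (l : List Char) (w b : Int) :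
    l.foldl umStep (w, b, false) = (w, b, false) := by
  induction l with
  | nil => rfl
  | cons c t ih => simpa [umStep] using ih

-- A's loop computes exactly the weighted sums of the prefix before the first space
theorem umFold_true (l : List Char) (w b : Int) :
    ((l.foldl umStep (w, b, true)).1, (l.foldl umStep (w, b, true)).2.1)
      = (w + wSum (l.takeWhile (· ≠ ' ')), b + bSum (l.takeWhile (· ≠ ' '))) := by
  induction l generalizing w b with
  | nil => simp [wSum, bSum]
  | cons c t ih =>
    by_cases hc : c = ' '
    · subst hc
      simp [umStep_true, umFold_false, wVal, bVal, wSum, bSum]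
    · simp only [List.foldl_cons, umStep_true, hc, if_false, List.takeWhile_cons]
      rw [show (decide (c ≠ ' ')) = true by simp [hc]]
      simp only [if_true, wSum_cons, bSum_cons, ih]
      simp only [Prod.mk.injEq]
      exact ⟨by ring, by ring⟩

-- B's reduce over the Counter equals the weighted sums
theorem alt_white (l : List Char) :
    ([('q',9),('r',5),('b',3),('n',3),('p',1)] : List (Char × Int)).foldl
      (fun a pv => a + (PySem.Dict.counter l).getD pv.1 0 * pv.2) 0 = wSum l := by
  simp [List.foldl, PySem.Dict.getD_counter, wSum]

theorem alt_black (l : List Char) :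
    ([('Q',9),('R',5),('B',3),('N',3),('P',1)] : List (Char × Int)).foldl
      (fun a pv => a + (PySem.Dict.counter l).getD pv.1 0 * pv.2) 0 = bSum l := by
  simp [List.foldl, PySem.Dict.getD_counter, bSum]

-- ===== VERDICT (by name: the statement is the Claim_ definition above) =====
theorem uneven_material_spec : Claim_equal_uneven_material := by
  intro fen _
  unfold Spec_uneven_material uneven_material uneven_material_alt
  have h := umFold_true fen.toList 0 0
  have h1 : (fen.toList.foldl umStep (0, 0, true)).1
      = wSum (fen.toList.takeWhile (· ≠ ' ')) := by
    have := congrArg Prod.fst h; simpa using this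
  have h2 : (fen.toList.foldl umStep (0, 0, true)).2.1
      = bSum (fen.toList.takeWhile (· ≠ ' ')) := by
    have := congrArg Prod.snd h; simpa using this
  simp only [h1, h2, alt_white, alt_black]
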